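-- pv_equiv track=rewrite | github.com/llouis0622/Algorithm_Deep_Dive | Programmers/Lv. 2/[Summer&WinterCoding] 영어 끝말잇기.py | solution
-- ===== SOURCE A (Python) =====
-- def solution(n, words):
--     temp = set()
--     temp.add(words[0])
--     for i in range(1, len(words)):
--         if words[i] in temp or words[i - 1][-1] != words[i][0]:
--             return [(i % n) + 1, (i // n) + 1]
--         temp.add(words[i])
--     return [0, 0]
-- ===== SOURCE B (Python) =====
-- def solution(n, words):
--     m = len(words)
--     brk = next((i for i in range(1, m) if words[i - 1][-1] != words[i][0]), m)
--     rep = next((i for i in range(1, m) if words[i] in words[:i]), m)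
--     i = min(brk, rep)
--     if i == m:
--         return [0, 0]
--     return [(i % n) + 1, (i // n) + 1]
-- ===== Notes on version B (the rewrite author's own statement) =====
-- stated objective: alternative
-- what changed: Replaces the single stateful loop that maintains a seen-set and returns at the first failure by two independent lazy first-index searches (earliest chain break, earliest repeated word against the prefix) combined by taking the minimum index.
-- outside the precondition, e.g. on solution(1, ['a', 'a', '']): A returns [1, 2], B raises IndexError
import Mathlib
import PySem

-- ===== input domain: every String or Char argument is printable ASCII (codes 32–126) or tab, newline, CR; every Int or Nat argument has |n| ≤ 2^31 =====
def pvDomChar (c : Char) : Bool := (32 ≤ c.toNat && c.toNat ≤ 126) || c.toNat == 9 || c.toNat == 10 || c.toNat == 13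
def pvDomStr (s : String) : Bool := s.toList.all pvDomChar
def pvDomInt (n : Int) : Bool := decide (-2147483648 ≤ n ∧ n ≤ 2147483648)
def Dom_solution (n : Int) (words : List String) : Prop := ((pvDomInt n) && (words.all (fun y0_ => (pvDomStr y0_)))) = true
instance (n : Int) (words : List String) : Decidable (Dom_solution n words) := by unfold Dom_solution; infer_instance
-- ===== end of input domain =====

-- B replaces A's single stateful seen-set loop by two independent lazy first-index searches combined by min (alternative decomposition, not claimed faster).

-- ===== PORT A =====
def solutionLoop (n : Int) (words : List String) (temp : PySem.Set String) (i : Nat) : List Int :=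
  if h : i < words.length then
    if PySem.Set.contains temp (words.getD i "")
        || decide (PySem.Str.pyGet? (words.getD (i - 1) "") (-1)
             ≠ PySem.Str.pyGet? (words.getD i "") 0) then
      [PySem.Int.mod (i : Int) n + 1, PySem.Int.floordiv (i : Int) n + 1]
    else solutionLoop n words (PySem.Set.add temp (words.getD i "")) (i + 1)
  else [0, 0]
termination_by words.length - i

def solution (n : Int) (words : List String) : List Int :=
  solutionLoop n words (PySem.Set.add PySem.Set.empty (words.getD 0 "")) 1

-- ===== PORT B =====
def brkAt (words : List String) (i : Int) : Bool :=
  decide (PySem.Str.pyGet? (PySem.List.pyGetD words (i - 1) "") (-1)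
          ≠ PySem.Str.pyGet? (PySem.List.pyGetD words i "") 0)

def repAt (words : List String) (i : Int) : Bool :=
  (PySem.List.slice words none (some i)).contains (PySem.List.pyGetD words i "")

def solution_alt (n : Int) (words : List String) : List Int :=
  let m : Int := words.length
  let brk := ((PySem.List.pyRange 1 m 1).find? (brkAt words)).getD m
  let rep := ((PySem.List.pyRange 1 m 1).find? (repAt words)).getD m
  let i := min brk rep
  if i = m then [0, 0]
  else [PySem.Int.mod i n + 1, PySem.Int.floordiv i n + 1]

-- ===== PRECONDITION & SPEC =====
-- Pre_ admits exactly the inputs on which BOTH Pythons return normally: words is nonempty,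
-- B's break scan never reaches an empty word (which would be an IndexError in either program),
-- and either n is nonzero or no step fails at all (so that no i % n is ever computed).
-- It excludes inputs where A returns but B raises: a repeated word followed by an empty word.
def pvBrkOk (words : List String) (j : Nat) : Bool :=
  words.getD (j - 1) "" != "" && words.getD j "" != "" &&
    (words.getD (j - 1) "").toList.getLast? == (words.getD j "").toList.head?

def pvContinueAt (words : List String) (j : Nat) : Bool :=
  !(words.take j).contains (words.getD j "") && pvBrkOk words j

def Pre_solution (n : Int) (words : List String) : Prop :=
  words ≠ [] ∧
  (∀ i ∈ List.range' 1 (words.length - 1),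
    (∀ j ∈ List.range' 1 (i - 1), pvBrkOk words j = true) →
      (words.getD (i - 1) "" ≠ "" ∧ words.getD i "" ≠ "")) ∧
  (n ≠ 0 ∨ ∀ j ∈ List.range' 1 (words.length - 1), pvContinueAt words j = true)
instance (n : Int) (words : List String) : Decidable (Pre_solution n words) := by
  unfold Pre_solution; infer_instance

def pvWitness_solution : Int × List String := (2, ["ab", "ba"])

def Spec_solution (n : Int) (words : List String) (out : List Int) : Prop := out = solution_alt n words
instance (n : Int) (words : List String) (out : List Int) : Decidable (Spec_solution n words out) := by unfold Spec_solution; infer_instance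

-- ===== CLAIM (what is proved, stated in full; the proofs are below) =====
def Claim_equal_solution : Prop := ∀ (n : Int) (words : List String), Dom_solution n words → Pre_solution n words → Spec_solution n words (solution n words)

-- ===== LEMMAS AND PROOFS =====

-- min of two first-hit indices over a strictly increasing list is the first index hitting either
lemma minFind (l : List Int) (d : Int) (p q : Int → Bool)
    (hp : l.Pairwise (· < ·)) (hd : ∀ x ∈ l, x < d) :
    min ((l.find? p).getD d) ((l.find? q).getD d)
      = (l.find? (fun x => p x || q x)).getD d := by
  induction l with
  | nil => simp
  | cons a t ih =>
    have ha : a < d := hd a (by simp)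
    have hat : ∀ x ∈ t, a < x := (List.pairwise_cons.mp hp).1
    have hp' := (List.pairwise_cons.mp hp).2
    have hd' : ∀ x ∈ t, x < d := fun x hx => hd x (List.mem_cons_of_mem _ hx)
    by_cases hpa : p a
    · by_cases hqa : q a
      · simp [hpa, hqa]
      · have hle : a ≤ (t.find? q).getD d := by
          cases hfq : t.find? q with
          | none => simpa using le_of_lt ha
          | some y => simpa using le_of_lt (hat y (List.mem_of_find?_eq_some hfq))
        simp [hpa, hqa, min_eq_left hle]
    · by_cases hqa : q a
      · have hle : a ≤ (t.find? p).getD d := by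
          cases hfp : t.find? p with
          | none => simpa using le_of_lt ha
          | some y => simpa using le_of_lt (hat y (List.mem_of_find?_eq_some hfp))
        simp [hpa, hqa, min_eq_right hle]
      · simp [hpa, hqa, ih hp' hd']

-- A's loop, started at i with temp = set of the first i words, is the first-failure search over range(i, len)
lemma loop_eq (n : Int) (words : List String) :
    ∀ k i : Nat, words.length - i = k → 1 ≤ i →
    solutionLoop n words (PySem.Set.ofList (words.take i)) i =
      match (PySem.List.pyRange (i : Int) (words.length : Int) 1).find?
              (fun j => repAt words j || brkAt words j) with
      | some j => [PySem.Int.mod j n + 1, PySem.Int.floordiv j n + 1]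
      | none => [0, 0] := by
  intro k
  induction k with
  | zero =>
    intro i hki h1
    have hge : ¬ i < words.length := by omega
    rw [solutionLoop, dif_neg hge,
      PySem.List.pyRange_one_eq_nil (by exact_mod_cast Nat.le_of_not_lt hge)]
    simp
  | succ k ih =>
    intro i hki h1
    by_cases hlt : i < words.length
    · rw [solutionLoop, dif_pos hlt]
      have hcast : ((i - 1 : Nat) : Int) = (i : Int) - 1 := by omega
      have hwi : PySem.List.pyGetD words (i : Int) "" = words.getD i "" := by
        simp [PySem.List.pyGetD_natCast]
      have hcond :
          (PySem.Set.contains (PySem.Set.ofList (words.take i)) (words.getD i "")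
            || decide (PySem.Str.pyGet? (words.getD (i - 1) "") (-1)
                 ≠ PySem.Str.pyGet? (words.getD i "") 0))
          = (repAt words (i : Int) || brkAt words (i : Int)) := by
        have hrep : repAt words (i : Int)
            = PySem.Set.contains (PySem.Set.ofList (words.take i)) (words.getD i "") := by
          simp only [repAt, PySem.List.slice_to_natCast, hwi]
          simp
        have hbrk : brkAt words (i : Int)
            = decide (PySem.Str.pyGet? (words.getD (i - 1) "") (-1)
                 ≠ PySem.Str.pyGet? (words.getD i "") 0) := by
          simp [brkAt, ← hcast, PySem.List.pyGetD_natCast]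
        rw [hrep, hbrk]
      rw [PySem.List.pyRange_one_cons (by exact_mod_cast hlt), hcond]
      by_cases hb : (repAt words (i : Int) || brkAt words (i : Int)) = true
      · rw [List.find?_cons_of_pos (by simpa using hb), if_pos hb]
      · rw [List.find?_cons_of_neg (by simpa using hb), if_neg hb]
        have htake : words.take (i + 1) = words.take i ++ [words.getD i ""] := by
          rw [List.take_add_one]
          simp [List.getElem?_eq_getElem hlt, List.getD_eq_getElem?_getD]
        have hofl : PySem.Set.add (PySem.Set.ofList (words.take i)) (words.getD i "")
            = PySem.Set.ofList (words.take (i + 1)) := by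
          rw [htake, PySem.Set.ofList_append_singleton]
        rw [hofl]
        have := ih (i + 1) (by omega) (by omega)
        rw [this]
        have : ((i + 1 : Nat) : Int) = (i : Int) + 1 := by push_cast; ring
        rw [this]
    · have hge := hlt
      rw [solutionLoop, dif_neg hlt,
        PySem.List.pyRange_one_eq_nil (by exact_mod_cast Nat.le_of_not_lt hlt)]
      simp

-- B as the first-failure search: min of the two finds is the find of the disjunction
lemma alt_eq (n : Int) (words : List String) :
    solution_alt n words =
      match (PySem.List.pyRange 1 (words.length : Int) 1).find?
              (fun j => repAt words j || brkAt words j) with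
      | some j => [PySem.Int.mod j n + 1, PySem.Int.floordiv j n + 1]
      | none => [0, 0] := by
  unfold solution_alt
  dsimp only
  have hpair : (PySem.List.pyRange 1 (words.length : Int) 1).Pairwise (· < ·) :=
    PySem.List.pairwise_lt_pyRange_one 1 (words.length : Int)
  have hmem : ∀ x ∈ PySem.List.pyRange 1 (words.length : Int) 1, x < (words.length : Int) :=
    fun x hx => (PySem.List.mem_pyRange_one.mp hx).2
  rw [minFind _ _ _ _ hpair hmem]
  have hcomm : (fun x => brkAt words x || repAt words x)
      = (fun j : Int => repAt words j || brkAt words j) := by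
    funext x; exact Bool.or_comm _ _
  rw [hcomm]
  cases hf : (PySem.List.pyRange 1 (words.length : Int) 1).find?
      (fun j => repAt words j || brkAt words j) with
  | none => simp
  | some j =>
    have hj := List.mem_of_find?_eq_some hf
    have hjlt : j < (words.length : Int) := hmem j hj
    simp [ne_of_lt hjlt]

theorem solution_spec : Claim_equal_solution := by
  intro n words hdom hpre
  obtain ⟨hne, -, -⟩ := hpre
  unfold Spec_solution
  rw [alt_eq]
  obtain ⟨w, ws, rfl⟩ : ∃ w ws, words = w :: ws := by
    cases words with
    | nil => exact absurd rfl hne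
    | cons w ws => exact ⟨w, ws, rfl⟩
  unfold solution
  have htemp : PySem.Set.add PySem.Set.empty ((w :: ws).getD 0 "")
      = PySem.Set.ofList ((w :: ws).take 1) := rfl
  rw [htemp, loop_eq n (w :: ws) ((w :: ws).length - 1) 1 rfl (le_refl 1)]
  norm_num
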